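-- pv_equiv track=rewrite | github.com/anupamck/advent-of-code-2023 | advent_of_code_2023/solutions/day13.py | is_double_pair
-- ===== SOURCE A (Python) =====
-- def is_double_pair(hand):
--     number_of_pairs = 0
--     for card in set(hand):
--         frequency = hand.count(card)
--         if frequency == 2:
--             number_of_pairs += 1
--     if number_of_pairs == 2:
--         return True
--     return False
-- ===== SOURCE B (Python) =====
-- def is_double_pair(hand):
--     s = sorted(hand)
--     pairs = 0
--     i = 0
--     n = len(s)
--     while i < n:
--         j = i + 1
--         while j < n and s[j] == s[i]:
--             j += 1
--         if j - i == 2: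
--             pairs += 1
--         i = j
--     return pairs == 2
-- ===== Notes on version B (the rewrite author's own statement) =====
-- stated objective: alternative
-- what changed: Replaces A's per-distinct-card rescan of the hand with .count by sorting the hand once and making a single run-length scan over adjacent equal cards, counting runs of length exactly 2.
import Mathlib
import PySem

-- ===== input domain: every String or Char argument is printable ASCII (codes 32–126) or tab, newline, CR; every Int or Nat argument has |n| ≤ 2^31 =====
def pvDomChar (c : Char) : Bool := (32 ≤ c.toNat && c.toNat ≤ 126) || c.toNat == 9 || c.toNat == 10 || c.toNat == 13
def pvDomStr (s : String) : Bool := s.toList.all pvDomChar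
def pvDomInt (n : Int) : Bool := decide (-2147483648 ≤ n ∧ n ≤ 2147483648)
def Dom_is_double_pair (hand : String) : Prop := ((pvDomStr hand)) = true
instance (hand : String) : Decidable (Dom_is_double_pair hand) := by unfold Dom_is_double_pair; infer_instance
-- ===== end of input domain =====

-- B sorts the hand and makes one run-length scan over adjacent equal cards, counting
-- runs of length exactly 2, instead of A's rescan of the hand with .count for each
-- distinct card (alternative: sort-then-scan vs per-distinct-card counting).

-- ===== PORT A =====
def is_double_pair (hand : String) : Bool :=
  let numberOfPairs : Int :=
    (PySem.Set.ofList hand.toList).foldl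
      (fun n card => if hand.toList.count card = 2 then n + 1 else n) 0
  if numberOfPairs = 2 then true else false

-- ===== PORT B =====
-- the outer while-loop of Source B: each step consumes one run of equal cards
-- (the inner 'while s[j] == s[i]' is the takeWhile/dropWhile split) and adds 1
-- when the run (j - i = 1 + run.length) has length exactly 2.
def countRuns : List Char → Int
  | [] => 0
  | c :: rest =>
    let run := rest.takeWhile (fun x => x == c)
    let rest' := rest.dropWhile (fun x => x == c)
    (if 1 + run.length = 2 then 1 else 0) + countRuns rest'
  termination_by l => l.length
  decreasing_by
    simp only [List.length_cons]
    exact Nat.lt_succ_of_le (List.length_dropWhile_le _ _)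

def is_double_pair_alt (hand : String) : Bool :=
  let s := PySem.List.sorted hand.toList (fun x => x) false
  let pairs := countRuns s
  decide (pairs = 2)

-- ===== PRECONDITION & SPEC =====
def Spec_is_double_pair (hand : String) (out : Bool) : Prop := out = is_double_pair_alt hand
instance (hand : String) (out : Bool) : Decidable (Spec_is_double_pair hand out) := by unfold Spec_is_double_pair; infer_instance

-- ===== CLAIM =====
def Claim_equal_is_double_pair : Prop := ∀ (hand : String), Dom_is_double_pair hand → Spec_is_double_pair hand (is_double_pair hand)

-- ===== LEMMAS AND PROOFS =====

-- On a sorted list, the run-length scan counts exactly the distinct cards of count 2.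
lemma countRuns_sorted (l : List Char) :
    l.Pairwise (· ≤ ·) →
    countRuns l = ((PySem.Set.ofList l).countP (fun c => decide (l.count c = 2)) : Int) := by
  induction l using countRuns.induct with
  | case1 => intro _; simp [countRuns]
  | case2 c rest' _drop ih =>
    intro hs
    simp only [countRuns]
    set run := rest'.takeWhile (fun x => x == c) with hrun_def
    set rest2 := rest'.dropWhile (fun x => x == c) with hrest2_def
    have hsplit : run ++ rest2 = rest' := List.takeWhile_append_dropWhile
    have hrp : rest'.Pairwise (· ≤ ·) := (List.pairwise_cons.1 hs).2
    have hle : ∀ x ∈ rest', c ≤ x := (List.pairwise_cons.1 hs).1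
    have hrunc : ∀ x ∈ run, x = c := by
      intro x hx
      have := List.mem_takeWhile_imp hx
      simpa using this
    have hnot : ∀ x ∈ rest2, x ≠ c := by
      cases hr : rest2 with
      | nil => intro x hx; simp at hx
      | cons h0 t =>
        have hne : ¬ ((h0 == c) = true) := by
          have hnil : rest'.dropWhile (fun x => x == c) ≠ [] := by
            rw [← hrest2_def, hr]; simp
          have := List.head_dropWhile_not (fun x => x == c) hnil
          have hhead : (rest'.dropWhile (fun x => x == c)).head hnil = h0 := by
            simp [← hrest2_def, hr]
          rw [hhead] at this
          simp [this]
        have hh0c : c < h0 := by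
          have hmem : h0 ∈ rest' := by
            have : h0 ∈ rest2 := by rw [hr]; simp
            exact (hsplit ▸ List.mem_append_right run this)
          have hle0 := hle h0 hmem
          rcases lt_or_eq_of_le hle0 with h | h
          · exact h
          · exact absurd (by simp [h.symm] : (h0 == c) = true) hne
        have hpw : rest2.Pairwise (· ≤ ·) := hrp.sublist (List.dropWhile_sublist _)
        rw [hr] at hpw
        intro x hx
        rcases List.mem_cons.1 hx with h | h
        · subst h; exact ne_of_gt hh0c
        · have : h0 ≤ x := (List.pairwise_cons.1 hpw).1 x h
          exact ne_of_gt (lt_of_lt_of_le hh0c this)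
    have hrest2pw : rest2.Pairwise (· ≤ ·) := hrp.sublist (List.dropWhile_sublist _)
    have hcount_c : (c :: rest').count c = run.length + 1 := by
      rw [List.count_cons_self, ← hsplit, List.count_append]
      have h1 : run.count c = run.length := List.count_eq_length.2 (fun b hb => (hrunc b hb).symm)
      have h2 : rest2.count c = 0 := List.count_eq_zero.2 (fun h => hnot c h rfl)
      omega
    have hcount_ne : ∀ x, x ≠ c → (c :: rest').count x = rest2.count x := by
      intro x hx
      have h1 : run.count x = 0 := List.count_eq_zero.2 (fun h => hx (hrunc x h))
      have hcx : ¬ (c = x) := fun h => hx h.symm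
      rw [← hsplit]
      simp [List.count_append, h1, hcx]
    have hofl : PySem.Set.ofList (c :: rest') = c :: PySem.Set.discard (PySem.Set.ofList rest') c :=
      PySem.Set.ofList_cons c rest'
    have hperm : (PySem.Set.discard (PySem.Set.ofList rest') c).Perm (PySem.Set.ofList rest2) := by
      refine (List.perm_ext_iff_of_nodup
        (PySem.Set.nodup_discard _ _ (PySem.Set.nodup_ofList _)) (PySem.Set.nodup_ofList _)).2 ?_
      intro x
      rw [PySem.Set.mem_discard, PySem.Set.mem_ofList, PySem.Set.mem_ofList]
      constructor
      · rintro ⟨hx, hxc⟩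
        rw [← hsplit] at hx
        rcases List.mem_append.1 hx with h | h
        · exact absurd (hrunc x h) hxc
        · exact h
      · intro hx
        exact ⟨hsplit ▸ List.mem_append_right run hx, hnot x hx⟩
    have hcongr : (PySem.Set.discard (PySem.Set.ofList rest') c).countP
          (fun x => decide ((c :: rest').count x = 2))
        = (PySem.Set.discard (PySem.Set.ofList rest') c).countP
          (fun x => decide (rest2.count x = 2)) := by
      refine List.countP_congr ?_
      intro x hx
      have hxc : x ≠ c := ((PySem.Set.mem_discard _ _ _).1 hx).2
      simp [hcount_ne x hxc]
    have ih' : rest2.Pairwise (· ≤ ·) →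
        countRuns rest2 = ((PySem.Set.ofList rest2).countP
          (fun x => decide (rest2.count x = 2)) : Int) := ih
    rw [ih' hrest2pw, hofl, List.countP_cons, hcongr, hperm.countP_eq]
    have hpc : (decide ((c :: rest').count c = 2)) = (decide (1 + run.length = 2)) := by
      rw [hcount_c]; simp only [decide_eq_decide]; omega
    rw [hpc]
    by_cases h : 1 + run.length = 2 <;> simp [h]
    omega

-- ===== VERDICT =====
theorem is_double_pair_spec : Claim_equal_is_double_pair := by
  intro hand _
  unfold Spec_is_double_pair is_double_pair is_double_pair_alt
  dsimp only
  rw [PySem.List.foldl_ite_add_one,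
      countRuns_sorted _ (PySem.List.sorted_pairwise hand.toList (fun x => x))]
  have hperm : (PySem.Set.ofList (PySem.List.sorted hand.toList (fun x => x) false)).Perm
      (PySem.Set.ofList hand.toList) := by
    refine (List.perm_ext_iff_of_nodup (PySem.Set.nodup_ofList _) (PySem.Set.nodup_ofList _)).2 ?_
    intro x
    simp [PySem.Set.mem_ofList, PySem.List.mem_sorted]
  have hcnt : ∀ c, (PySem.List.sorted hand.toList (fun x => x) false).count c = hand.toList.count c :=
    fun c => (PySem.List.sorted_perm hand.toList (fun x => x) false).count_eq c
  have h1 : (PySem.Set.ofList (PySem.List.sorted hand.toList (fun x => x) false)).countP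
        (fun c => decide ((PySem.List.sorted hand.toList (fun x => x) false).count c = 2))
      = (PySem.Set.ofList hand.toList).countP (fun c => decide (hand.toList.count c = 2)) := by
    rw [List.countP_congr (q := fun c => decide (hand.toList.count c = 2))
        (fun c _ => by simp [hcnt c]), hperm.countP_eq]
  rw [h1]
  split_ifs with h <;> simp_all
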